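-- pv_equiv track=rewrite | github.com/scoutwer/prg-basics | 04-Functions/7-21.py | f
-- ===== SOURCE A (Python) =====
-- def f(txt):
--     res = txt.split()
--     result = ""
--     if len(res) == 1:
--         return res[0][0].upper()
--     else:
--         for i in range(len(res)):
--             result = result + res[i][0]
--         return result.upper()
-- ===== SOURCE B (Python) =====
-- def f(txt):
--     # Single left-to-right character scan with an in_word flag: emit the
--     # uppercased first character of each whitespace-separated word.
--     initials = []
--     in_word = False
--     for ch in txt:
--         if ch.isspace():
--             in_word = False
--         elif not in_word:
--             initials.append(ch.upper())
--             in_word = True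
--     return "".join(initials)
-- ===== Notes on version B (the rewrite author's own statement) =====
-- stated objective: alternative
-- what changed: Replaces split()-then-index (building the full word list, branching on its length, and concatenating first characters before a final upper()) by a single character scan with an in_word flag that emits each word's uppercased first character directly.
import Mathlib
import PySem

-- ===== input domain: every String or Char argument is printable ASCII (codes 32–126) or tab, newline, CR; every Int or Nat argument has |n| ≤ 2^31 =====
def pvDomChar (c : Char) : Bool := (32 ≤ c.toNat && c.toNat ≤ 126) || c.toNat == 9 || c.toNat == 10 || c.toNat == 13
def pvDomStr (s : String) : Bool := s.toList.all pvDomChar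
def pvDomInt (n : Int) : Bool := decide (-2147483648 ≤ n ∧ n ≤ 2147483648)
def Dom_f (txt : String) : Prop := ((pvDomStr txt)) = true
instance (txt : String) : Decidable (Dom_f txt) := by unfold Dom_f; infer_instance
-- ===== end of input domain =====

-- B replaces split()+indexing by a single character scan with an in_word flag; objective: alternative (same cost, different algorithm).

-- ===== PORT A =====
-- A: res = txt.split(); if one word, return its first char uppercased; else
-- concatenate the first char of every word and uppercase the whole string.
-- Python indexes res[i][0]; every word produced by split() is nonempty, so
-- w[0] is exactly w.take 1 rendered as the (nonempty) one-element prefix.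
def f (txt : String) : String :=
  let res := PySem.Chars.split₀ txt.toList
  let result : List Char := []
  if res.length == 1 then
    String.ofList (PySem.Chars.upper ((res.headD []).take 1))
  else
    String.ofList (PySem.Chars.upper
      ((PySem.List.pyRange 0 (PySem.List.len res)).foldl
        (fun acc i => acc ++ (PySem.List.pyGetD res i []).take 1) result))

-- ===== PORT B =====
-- B: one scan over the characters with an in_word flag, collecting each
-- word's uppercased first character; ch.upper() on the ASCII domain is upperChar.
def f_alt (txt : String) : String :=
  let r := txt.toList.foldl
    (fun (st : Bool × List Char) ch =>
      if PySem.Chars.isspace ch then (false, st.2)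
      else if st.1 then st
      else (true, st.2 ++ [PySem.Chars.upperChar ch]))
    (false, [])
  String.ofList r.2

-- ===== PRECONDITION & SPEC =====
def Spec_f (txt : String) (out : String) : Prop := out = f_alt txt
instance (txt : String) (out : String) : Decidable (Spec_f txt out) := by unfold Spec_f; infer_instance

-- ===== CLAIM (what is proved, stated in full; the proofs are below) =====
def Claim_equal_f : Prop := ∀ (txt : String), Dom_f txt → Spec_f txt (f txt)

-- ===== LEMMAS AND PROOFS =====

-- Structural characterisation of Python's str.split(): the word list.
def wordsOf : List Char → List (List Char)
  | [] => []
  | c :: t =>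
    if PySem.Chars.isspace c then wordsOf t
    else (c :: t.takeWhile (fun d => !PySem.Chars.isspace d)) ::
         wordsOf (t.dropWhile (fun d => !PySem.Chars.isspace d))
termination_by l => l.length
decreasing_by
  · simp
  · exact Nat.lt_succ_of_le (List.length_dropWhile_le _ t)

theorem split_go_eq (l : List Char) : ∀ (cur : List Char) (acc : List (List Char)),
    PySem.Chars.split₀.go l cur acc =
      acc.reverse ++
        (if cur.isEmpty then wordsOf l
         else (cur.reverse ++ l.takeWhile (fun d => !PySem.Chars.isspace d)) ::
              wordsOf (l.dropWhile (fun d => !PySem.Chars.isspace d))) := by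
  induction l with
  | nil =>
    intro cur acc
    by_cases h : cur.isEmpty <;> simp [PySem.Chars.split₀.go, h, wordsOf]
  | cons c rest ih =>
    intro cur acc
    by_cases hs : PySem.Chars.isspace c
    · by_cases h : cur.isEmpty
      · simp [PySem.Chars.split₀.go, hs, h, ih, wordsOf]
      · simp [PySem.Chars.split₀.go, hs, h, ih, wordsOf]
    · by_cases h : cur.isEmpty
      · have hc : cur = [] := by simpa [List.isEmpty_iff] using h
        simp [PySem.Chars.split₀.go, hs, hc, ih, wordsOf]
      · simp [PySem.Chars.split₀.go, hs, h, ih]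

theorem split₀_eq_wordsOf (l : List Char) : PySem.Chars.split₀ l = wordsOf l := by
  simpa using split_go_eq l [] []

-- The canonical result both programs compute: uppercased first characters.
def initialsOf (l : List Char) : List Char :=
  ((wordsOf l).map (fun w => PySem.Chars.upper (w.take 1))).flatten

-- B's step function.
def bstep (st : Bool × List Char) (ch : Char) : Bool × List Char :=
  if PySem.Chars.isspace ch then (false, st.2)
  else if st.1 then st
  else (true, st.2 ++ [PySem.Chars.upperChar ch])

-- While in_word is set, non-space characters are skipped.
theorem bfold_skip (l : List Char) : ∀ (acc : List Char),
    (l.foldl bstep (true, acc)).2 =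
      ((l.dropWhile (fun d => !PySem.Chars.isspace d)).foldl bstep (false, acc)).2 := by
  induction l with
  | nil => intro acc; simp
  | cons c rest ih =>
    intro acc
    by_cases hs : PySem.Chars.isspace c
    · simp [bstep, hs]
    · simp [bstep, hs, ih]

theorem bfold_main (l : List Char) : ∀ (acc : List Char),
    (l.foldl bstep (false, acc)).2 = acc ++ initialsOf l := by
  induction l using wordsOf.induct with
  | case1 => intro acc; simp [initialsOf, wordsOf]
  | case2 c t hs ih =>
    intro acc
    simp only [List.foldl_cons, bstep, hs, if_pos]
    rw [ih]
    simp [initialsOf, wordsOf, hs, PySem.Chars.upper]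
  | case3 c t hs ih =>
    intro acc
    simp only [List.foldl_cons, bstep, hs, Bool.false_eq_true, if_false]
    rw [bfold_skip, ih]
    simp [initialsOf, wordsOf, hs, PySem.Chars.upper]

-- A's value is also the uppercased initials, in both branches.
theorem a_eq_initials (l : List Char) :
    f (String.ofList l) = String.ofList (initialsOf l) := by
  have htl : (String.ofList l).toList = l := by simp
  by_cases h1 : (wordsOf l).length = 1
  · obtain ⟨w, hw⟩ : ∃ w, wordsOf l = [w] := by
      cases hwl : wordsOf l with
      | nil => simp [hwl] at h1
      | cons a t => cases t with
        | nil => exact ⟨a, rfl⟩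
        | cons b u => simp [hwl] at h1
    simp [f, htl, split₀_eq_wordsOf, hw, initialsOf]
  · have hne : ((wordsOf l).length == 1) = false := by
      simpa using h1
    simp only [f, htl, split₀_eq_wordsOf, hne, Bool.false_eq_true, if_false]
    rw [PySem.List.foldl_pyRange_pyGetD (wordsOf l) [] (fun acc w => acc ++ w.take 1) []
        (le_refl 0)]
    simp [initialsOf, PySem.Chars.upper, List.map_take, Function.comp_def]

-- ===== VERDICT (by name: the statement is the Claim_ definition above) =====
theorem f_spec : Claim_equal_f := by
  intro txt _
  unfold Spec_f f_alt
  have hb : (txt.toList.foldl bstep (false, [])).2 = initialsOf txt.toList :=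
    by simpa using bfold_main txt.toList []
  have ha : f (String.ofList txt.toList) = String.ofList (initialsOf txt.toList) :=
    a_eq_initials txt.toList
  simp only [String.ofList_toList] at ha
  rw [ha]
  congr 1
  rw [← hb]
  rfl
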